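-- pv_equiv track=rewrite | github.com/PauloSolis09/algoritmo25 | ps/Ejercicio-2_Lista-enlazada/EjemploPila-Ejercicio1.py | separarParImpar
-- ===== SOURCE A (Python) =====
-- def separarParImpar(pila):
--     pares = []
--     impares = []
--
--     # Separamos los pares e impares usando otra pila
--     while pila:
--         numero = pila.pop()
--         if numero % 2 == 0:
--             pares.append(numero)
--         else:
--             impares.append(numero)
--
--     # Primero agregamos los pares (parte inferior de la pila)
--     for num in reversed(pares):
--         pila.append(num)
--
--     # Luego los impares (parte superior de la pila)
--     for num in reversed(impares):
--         pila.append(num)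
--
--     return pila
-- ===== SOURCE B (Python) =====
-- def separarParImpar(pila):
--     # One stable sort keyed on parity: evens (key 0) before odds (key 1),
--     # each group keeping its original order. Slice-assign mutates the same
--     # list object in place, like A does, and it is returned.
--     pila[:] = sorted(pila, key=lambda x: x % 2)
--     return pila
-- ===== Notes on version B (the rewrite author's own statement) =====
-- stated objective: idiomatic
-- what changed: Replaced the pop-into-two-auxiliary-stacks-and-push-back partition with a single stable sort keyed on parity (x % 2), which yields evens in original order followed by odds in original order.
import Mathlib
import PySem

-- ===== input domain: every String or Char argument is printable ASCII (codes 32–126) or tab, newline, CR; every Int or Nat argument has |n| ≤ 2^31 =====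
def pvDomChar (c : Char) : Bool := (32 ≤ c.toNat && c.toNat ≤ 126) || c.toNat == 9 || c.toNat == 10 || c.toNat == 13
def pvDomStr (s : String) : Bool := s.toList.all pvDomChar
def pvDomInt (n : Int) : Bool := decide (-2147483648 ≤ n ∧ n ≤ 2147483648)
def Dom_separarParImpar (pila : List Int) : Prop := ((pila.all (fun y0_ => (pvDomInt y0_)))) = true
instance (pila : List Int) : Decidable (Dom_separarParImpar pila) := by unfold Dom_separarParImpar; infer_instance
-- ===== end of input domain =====

-- B replaces A's pop-into-two-stacks-and-push-back partition by one stable sort keyed on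
-- parity (same return value; both Pythons mutate the argument list in place — the
-- equivalence proved here is about the return value).


-- ===== PORT A =====
-- while pila: numero = pila.pop(); append to pares/impares
def sepLoop (pila pares impares : List Int) : List Int × List Int :=
  match h : pila.getLast? with
  | none => (pares, impares)
  | some numero =>
    if PySem.Int.mod numero 2 == 0 then
      sepLoop pila.dropLast (pares ++ [numero]) impares
    else
      sepLoop pila.dropLast pares (impares ++ [numero])
termination_by pila.length
decreasing_by
  all_goals cases pila with
  | nil => simp at h
  | cons a as => simp

def separarParImpar (pila : List Int) : List Int :=
  let r := sepLoop pila [] []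
  -- for num in reversed(pares): pila.append(num); then the same for impares
  r.1.reverse ++ r.2.reverse

-- ===== PORT B =====
def separarParImpar_alt (pila : List Int) : List Int :=
  PySem.List.sorted pila (fun x => PySem.Int.mod x 2) false

-- ===== PRECONDITION & SPEC =====
def Spec_separarParImpar (pila : List Int) (out : List Int) : Prop := out = separarParImpar_alt pila
instance (pila : List Int) (out : List Int) : Decidable (Spec_separarParImpar pila out) := by unfold Spec_separarParImpar; infer_instance

-- ===== CLAIM (what is proved, stated in full; the proofs are below) =====
def Claim_equal_separarParImpar : Prop := ∀ (pila : List Int), Dom_separarParImpar pila → Spec_separarParImpar pila (separarParImpar pila)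

-- ===== LEMMAS AND PROOFS =====

-- Python's x % 2 is Lean's emod for the positive divisor 2
lemma hm (a : Int) : PySem.Int.mod a 2 = a % 2 := PySem.Int.mod_eq_emod_of_pos (by norm_num)

-- A's loop collects the evens (reversed) after pares and the odds (reversed) after impares
lemma sepLoop_eq (pila : List Int) : ∀ pares impares,
    sepLoop pila pares impares =
      (pares ++ (pila.filter (fun x => x % 2 == 0)).reverse,
       impares ++ (pila.filter (fun x => !(x % 2 == 0))).reverse) := by
  induction pila using List.reverseRecOn with
  | nil => intro pares impares; simp [sepLoop]
  | append_singleton ys y ih =>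
    intro pares impares
    rw [sepLoop]
    split
    · next hnone => simp at hnone
    · next numero hsome =>
      rw [List.getLast?_concat] at hsome
      obtain rfl : numero = y := by simpa using hsome.symm
      simp only [List.dropLast_concat, hm]
      split_ifs with h
      · rw [ih]
        simp [List.filter_append, h, List.append_assoc]
      · rw [ih]
        simp [List.filter_append, h, List.append_assoc]

lemma insertBy_append_of_false {bf : Int → Int → Bool} {x : Int} (E O : List Int)
    (hE : ∀ e ∈ E, bf x e = false) :
    PySem.List.insertBy bf x (E ++ O) = E ++ PySem.List.insertBy bf x O := by
  induction E with
  | nil => simp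
  | cons e E ih =>
    have he : bf x e = false := hE e (by simp)
    simp [PySem.List.insertBy, he, ih (fun e' h' => hE e' (by simp [h']))]

lemma insertBy_append_singleton {bf : Int → Int → Bool} {x : Int} (l : List Int)
    (h : ∀ y ∈ l, bf x y = false) :
    PySem.List.insertBy bf x l = l ++ [x] := by
  induction l with
  | nil => simp [PySem.List.insertBy]
  | cons y l ih =>
    have hy : bf x y = false := h y (by simp)
    simp [PySem.List.insertBy, hy, ih (fun y' h' => h y' (by simp [h']))]

-- invariant of B's insertion-sort fold: evens accumulate in front, odds behind
lemma foldl_insert_inv (xs : List Int) :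
    ∀ (E O : List Int), (∀ e ∈ E, e % 2 = 0) → (∀ o ∈ O, o % 2 = 1) →
    xs.foldl (fun acc x =>
        PySem.List.insertBy (fun a b => decide (a % 2 < b % 2)) x acc) (E ++ O)
    = (E ++ xs.filter (fun x => x % 2 == 0))
      ++ (O ++ xs.filter (fun x => !(x % 2 == 0))) := by
  induction xs with
  | nil => simp
  | cons x xs ih =>
    intro E O hE hO
    simp only [List.foldl_cons]
    rcases Int.emod_two_eq x with hx | hx
    · have step : PySem.List.insertBy (fun a b => decide (a % 2 < b % 2)) x (E ++ O)
          = (E ++ [x]) ++ O := by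
        rw [insertBy_append_of_false E O
          (fun e he => by simp [hx, hE e he])]
        cases O with
        | nil => simp [PySem.List.insertBy]
        | cons o O' =>
          have ho : o % 2 = 1 := hO o (by simp)
          have hlt : x % 2 < o % 2 := by omega
          simp [PySem.List.insertBy, hlt]
      rw [step, ih (E ++ [x]) O
        (by intro e he
            rcases List.mem_append.mp he with h | h
            · exact hE e h
            · simp at h; simp [h, hx]) hO]
      simp [hx, List.append_assoc]
    · have step : PySem.List.insertBy (fun a b => decide (a % 2 < b % 2)) x (E ++ O)
          = E ++ (O ++ [x]) := by
        rw [← List.append_assoc]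
        refine insertBy_append_singleton (E ++ O) ?_
        intro y hy
        rcases List.mem_append.mp hy with h | h
        · have := hE y h; simp; omega
        · have := hO y h; simp; omega
      rw [step, ih E (O ++ [x]) hE
        (by intro o ho
            rcases List.mem_append.mp ho with h | h
            · exact hO o h
            · simp at h; simp [h, hx])]
      simp [hx, List.append_assoc]

-- ===== VERDICT (by name: the statement is the Claim_ definition above) =====
theorem separarParImpar_spec : Claim_equal_separarParImpar := by
  intro pila _
  unfold Spec_separarParImpar separarParImpar separarParImpar_alt
  rw [sepLoop_eq]
  simp only [List.nil_append, List.reverse_reverse]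
  rw [PySem.List.sorted]
  simp only [hm, Bool.false_eq_true, if_false]
  simpa using (foldl_insert_inv pila [] [] (by simp) (by simp)).symm
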